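-- pv_equiv track=rewrite | github.com/MaiNavon/Repository-Summarizer | app/tools/github_fetcher.py | _extract_cargo_deps
-- ===== SOURCE A (Python) =====
-- def _extract_cargo_deps(content: str) -> str:
--     """Extract dependencies from Cargo.toml."""
--     lines = []
--     in_deps = False
--
--     for line in content.split("\n"):
--         if "[package]" in line:
--             lines.append(line)
--             in_deps = True
--         elif "[dependencies]" in line or "[dev-dependencies]" in line:
--             lines.append(line)
--             in_deps = True
--         elif line.startswith("[") and in_deps:
--             in_deps = False
--         elif in_deps:
--             lines.append(line)
--
--     return "\n".join(lines[:80])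
-- ===== SOURCE B (Python) =====
-- def _extract_cargo_deps(content: str) -> str:
--     """Extract dependencies from Cargo.toml by carving the lines into
--     boundary-headed sections and keeping only the target sections."""
--     targets = ("[package]", "[dependencies]", "[dev-dependencies]")
--     lines = content.split("\n")
--     n = len(lines)
--     kept = []
--     i = 0
--     while i < n:
--         j = i + 1
--         while j < n and not (any(t in lines[j] for t in targets)
--                              or lines[j].startswith("[")):
--             j += 1
--         if any(t in lines[i] for t in targets):
--             kept.extend(lines[i:j])
--         i = j
--     return "\n".join(kept[:80])
-- ===== Notes on version B (the rewrite author's own statement) =====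
-- stated objective: alternative
-- what changed: Replaces A's single-pass boolean in_deps state machine with a stateless section-carving decomposition: lines are cut at boundary lines (target headers or lines starting with '[') into header+body sections, and a section is kept iff its header contains a target marker.
import Mathlib
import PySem

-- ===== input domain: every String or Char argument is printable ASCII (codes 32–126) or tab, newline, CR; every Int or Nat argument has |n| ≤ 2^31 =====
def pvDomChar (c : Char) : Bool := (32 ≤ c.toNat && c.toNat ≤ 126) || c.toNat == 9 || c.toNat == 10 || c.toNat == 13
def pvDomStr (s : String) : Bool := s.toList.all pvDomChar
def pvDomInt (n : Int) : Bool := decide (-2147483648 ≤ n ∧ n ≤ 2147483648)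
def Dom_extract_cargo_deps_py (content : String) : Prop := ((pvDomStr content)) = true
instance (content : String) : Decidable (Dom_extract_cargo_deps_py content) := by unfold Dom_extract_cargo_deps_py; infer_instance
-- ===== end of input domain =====

-- B replaces A's boolean in_deps state machine by a section-carving decomposition
-- (takeWhile/dropWhile at boundary lines); objective: alternative, same cost.


-- ===== PORT A =====
-- the body of A's for-loop; state = (lines, in_deps)
def pvStepA (st : List String × Bool) (line : String) : List String × Bool :=
  if PySem.Str.isIn "[package]" line then (st.1 ++ [line], true)
  else if PySem.Str.isIn "[dependencies]" line || PySem.Str.isIn "[dev-dependencies]" line then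
    (st.1 ++ [line], true)
  else if PySem.Str.startswith line "[" && st.2 then (st.1, false)
  else if st.2 then (st.1 ++ [line], st.2)
  else st

def extract_cargo_deps_py (content : String) : String :=
  let st := (((PySem.Str.split? content "\n").getD []).foldl pvStepA ([], false))
  PySem.Str.join "\n" (st.1.take 80)

-- ===== PORT B =====
def pvTarget (line : String) : Bool :=
  PySem.Str.isIn "[package]" line || PySem.Str.isIn "[dependencies]" line ||
    PySem.Str.isIn "[dev-dependencies]" line

def pvBoundary (line : String) : Bool :=
  pvTarget line || PySem.Str.startswith line "["

-- carve into sections headed by boundary lines; keep a section iff its head is a target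
def pvSections : List String → List String
  | [] => []
  | l :: rest =>
    let body := rest.takeWhile (fun x => !pvBoundary x)
    let tail := rest.dropWhile (fun x => !pvBoundary x)
    if pvTarget l then l :: (body ++ pvSections tail) else pvSections tail
termination_by ls => ls.length
decreasing_by
  all_goals
    exact Nat.lt_succ_of_le (List.length_dropWhile_le _ _)

def extract_cargo_deps_py_alt (content : String) : String :=
  PySem.Str.join "\n" ((pvSections ((PySem.Str.split? content "\n").getD [])).take 80)

-- ===== PRECONDITION & SPEC =====
def Spec_extract_cargo_deps_py (content : String) (out : String) : Prop := out = extract_cargo_deps_py_alt content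
instance (content : String) (out : String) : Decidable (Spec_extract_cargo_deps_py content out) := by unfold Spec_extract_cargo_deps_py; infer_instance

-- ===== CLAIM (what is proved, stated in full; the proofs are below) =====
def Claim_equal_extract_cargo_deps_py : Prop := ∀ (content : String), Dom_extract_cargo_deps_py content → Spec_extract_cargo_deps_py content (extract_cargo_deps_py content)

-- ===== LEMMAS AND PROOFS =====

-- one unfolding of A's step, phrased through pvTarget/pvBoundary
lemma pvStepA_target (acc : List String) (b : Bool) (l : String) (ht : pvTarget l = true) :
    pvStepA (acc, b) l = (acc ++ [l], true) := by
  cases hp : PySem.Str.isIn "[package]" l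
  · simp only [pvTarget, hp, Bool.false_or] at ht
    simp only [pvStepA, hp, ht]
    simp
  · simp only [pvStepA, hp]
    simp

lemma pvStepA_skip (acc : List String) (l : String) (ht : pvTarget l = false) :
    pvStepA (acc, false) l = (acc, false) := by
  simp only [pvTarget, Bool.or_eq_false_iff] at ht
  simp only [pvStepA, ht.1.1, ht.1.2, ht.2]
  simp

lemma pvStepA_close (acc : List String) (l : String) (ht : pvTarget l = false)
    (hs : PySem.Str.startswith l "[" = true) :
    pvStepA (acc, true) l = (acc, false) := by
  simp only [pvTarget, Bool.or_eq_false_iff] at ht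
  simp only [pvStepA, ht.1.1, ht.1.2, ht.2, hs]
  simp

lemma pvStepA_body (acc : List String) (l : String) (ht : pvTarget l = false)
    (hs : PySem.Str.startswith l "[" = false) :
    pvStepA (acc, true) l = (acc ++ [l], true) := by
  simp only [pvTarget, Bool.or_eq_false_iff] at ht
  simp only [pvStepA, ht.1.1, ht.1.2, ht.2, hs]
  simp

-- the cons unfolding of pvSections (well-founded recursion)
lemma pvSections_cons (l : String) (rest : List String) :
    pvSections (l :: rest) =
      if pvTarget l then
        l :: (rest.takeWhile (fun x => !pvBoundary x) ++
          pvSections (rest.dropWhile (fun x => !pvBoundary x)))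
      else pvSections (rest.dropWhile (fun x => !pvBoundary x)) := by
  rw [pvSections.eq_def]

-- pvSections ignores leading non-boundary lines
lemma pvSections_dropWhile (ls : List String) :
    pvSections (ls.dropWhile (fun x => !pvBoundary x)) = pvSections ls := by
  cases ls with
  | nil => rfl
  | cons l ls =>
    by_cases hb : pvBoundary l = true
    · simp [hb]
    · have hb' : pvBoundary l = false := by simpa using hb
      have ht : pvTarget l = false := by
        cases h : pvTarget l
        · rfl
        · exact absurd (by unfold pvBoundary; rw [h]; rfl) hb
      simp only [List.dropWhile_cons, hb', Bool.not_false, if_true]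
      rw [pvSections_cons, if_neg (by simp [ht])]

-- the loop invariant: A's fold from state (acc, d) appends exactly what B's carving keeps
lemma pvLoop_eq (ls : List String) : ∀ acc : List String,
    ((ls.foldl pvStepA (acc, false)).1 = acc ++ pvSections ls) ∧
    ((ls.foldl pvStepA (acc, true)).1 =
      acc ++ (ls.takeWhile (fun x => !pvBoundary x) ++
        pvSections (ls.dropWhile (fun x => !pvBoundary x)))) := by
  induction ls with
  | nil => intro acc; simp [pvSections]
  | cons l ls ih =>
    intro acc
    by_cases ht : pvTarget l = true
    · have hb : pvBoundary l = true := by unfold pvBoundary; rw [ht]; rfl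
      constructor
      · rw [List.foldl_cons, pvStepA_target acc false l ht, (ih (acc ++ [l])).2,
          pvSections_cons, if_pos ht]
        simp
      · rw [List.foldl_cons, pvStepA_target acc true l ht, (ih (acc ++ [l])).2,
          List.takeWhile_cons, List.dropWhile_cons]
        simp only [hb, Bool.not_true, Bool.false_eq_true, if_false]
        rw [pvSections_cons, if_pos ht]
        simp
    · have ht' : pvTarget l = false := by simpa using ht
      by_cases hs : PySem.Str.startswith l "[" = true
      · have hb : pvBoundary l = true := by unfold pvBoundary; rw [ht', hs]; rfl
        constructor
        · rw [List.foldl_cons, pvStepA_skip acc l ht', (ih acc).1,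
            pvSections_cons, if_neg (by simp [ht']), pvSections_dropWhile]
        · rw [List.foldl_cons, pvStepA_close acc l ht' hs, (ih acc).1,
            List.takeWhile_cons, List.dropWhile_cons]
          simp only [hb, Bool.not_true, Bool.false_eq_true, if_false]
          rw [pvSections_cons, if_neg (by simp [ht']), pvSections_dropWhile]
          simp
      · have hs' : PySem.Str.startswith l "[" = false := by simpa using hs
        have hb : pvBoundary l = false := by unfold pvBoundary; rw [ht', hs']; rfl
        constructor
        · rw [List.foldl_cons, pvStepA_skip acc l ht', (ih acc).1,
            pvSections_cons, if_neg (by simp [ht']), pvSections_dropWhile]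
        · rw [List.foldl_cons, pvStepA_body acc l ht' hs', (ih (acc ++ [l])).2,
            List.takeWhile_cons, List.dropWhile_cons]
          simp [hb]

-- ===== VERDICT (by name: the statement is the Claim_ definition above) =====
theorem extract_cargo_deps_py_spec : Claim_equal_extract_cargo_deps_py := by
  intro content _
  unfold Spec_extract_cargo_deps_py extract_cargo_deps_py extract_cargo_deps_py_alt
  simp only [(pvLoop_eq ((PySem.Str.split? content "\n").getD []) []).1, List.nil_append]
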